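-- pv_equiv track=rewrite | github.com/ngoclaithe/airlinetickettoolai | app/helpers/parse_data_helpers.py | extract_flight_info
-- ===== SOURCE A (Python) =====
-- def extract_flight_info(data):
--     flight_info = {}
--     flight_info['Description'] = data[0].replace('FLIGHT', '').strip()
--     flight_info['Equipment'] = data[2].replace('EQUIPMENT:', '').strip()
--
--     lines = data[1].strip().split('\n')
--
--     departure_info = []
--     arrival_info = []
--     is_departure = False
--     is_arrival = False
--
--     for line in lines:
--         line = line.strip()
--
--         if line.startswith('DEPARTURE:'):
--             is_departure = True
--             departure_info.append(line.replace('DEPARTURE:', '').strip())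
--         elif line.startswith('ARRIVAL:'):
--             is_departure = False
--             is_arrival = True
--             arrival_info.append(line.replace('ARRIVAL:', '').strip())
--         elif is_departure:
--             departure_info.append(line)
--         elif is_arrival:
--             if 'FLIGHT BOOKING REF' in line:
--                 arrival_info.append(line.split('FLIGHT BOOKING REF')[0].strip())
--                 is_arrival = False
--             else:
--                 arrival_info.append(line)
--
--         if 'DURATION:' in line:
--             parts = line.split('DURATION:')
--             flight_info['Economy Class'] = parts[0].strip().replace('RESERVATION CONFIRMED, ', '')
--             flight_info['Duration'] = parts[1].strip()
--         elif 'BAGGAGE ALLOWANCE:' in line: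
--             flight_info['Baggage'] = line.replace('BAGGAGE ALLOWANCE:', '').strip()
--         elif 'MEAL:' in line:
--             flight_info['Meal'] = line.replace('MEAL:', '').strip()
--         elif 'NON STOP' in line:
--             flight_info['NonStop'] = line.replace('NON STOP', '').strip()
--
--     flight_info['Departure'] = '\n'.join(departure_info).strip()
--     flight_info['Arrival'] = '\n'.join(arrival_info).strip()
--
--     return flight_info
-- ===== SOURCE B (Python) =====
-- def extract_flight_info(data):
--     def _is_marker(l):
--         return l.startswith('DEPARTURE:') or l.startswith('ARRIVAL:')
--
--     def _arrival_body(body):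
--         for i, l in enumerate(body):
--             if 'FLIGHT BOOKING REF' in l:
--                 return body[:i] + [l.split('FLIGHT BOOKING REF')[0].strip()]
--         return body
--
--     def _fields(line):
--         if 'DURATION:' in line:
--             parts = line.split('DURATION:')
--             return [('Economy Class', parts[0].strip().replace('RESERVATION CONFIRMED, ', '')),
--                     ('Duration', parts[1].strip())]
--         if 'BAGGAGE ALLOWANCE:' in line:
--             return [('Baggage', line.replace('BAGGAGE ALLOWANCE:', '').strip())]
--         if 'MEAL:' in line:
--             return [('Meal', line.replace('MEAL:', '').strip())]
--         if 'NON STOP' in line: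
--             return [('NonStop', line.replace('NON STOP', '').strip())]
--         return []
--
--     lines = [l.strip() for l in data[1].strip().split('\n')]
--
--     # segment the line list at marker lines (DEPARTURE:/ARRIVAL:) instead of a stateful flag machine
--     dep, arr = [], []
--     rest = lines[next((i for i, l in enumerate(lines) if _is_marker(l)), len(lines)):]
--     while rest:
--         head, tail = rest[0], rest[1:]
--         e = next((i for i, l in enumerate(tail) if _is_marker(l)), len(tail))
--         body, rest = tail[:e], tail[e:]
--         if head.startswith('DEPARTURE:'):
--             dep += [head.replace('DEPARTURE:', '').strip()] + body
--         else:
--             arr += [head.replace('ARRIVAL:', '').strip()] + _arrival_body(body)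
--
--     flight_info = {
--         'Description': data[0].replace('FLIGHT', '').strip(),
--         'Equipment': data[2].replace('EQUIPMENT:', '').strip(),
--     }
--     for line in lines:
--         for key, value in _fields(line):
--             flight_info[key] = value
--     flight_info['Departure'] = '\n'.join(dep).strip()
--     flight_info['Arrival'] = '\n'.join(arr).strip()
--     return flight_info
-- ===== Notes on version B (the rewrite author's own statement) =====
-- stated objective: alternative
-- what changed: Replaced A's single stateful loop with boolean section flags by an index-free segmentation: the line list is split at DEPARTURE:/ARRIVAL: marker lines into segments whose bodies are attached wholesale (arrival bodies truncated at the first FLIGHT BOOKING REF line), and the scalar fields come from a per-line helper returning (key,value) update pairs applied to the dict.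
import Mathlib
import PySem

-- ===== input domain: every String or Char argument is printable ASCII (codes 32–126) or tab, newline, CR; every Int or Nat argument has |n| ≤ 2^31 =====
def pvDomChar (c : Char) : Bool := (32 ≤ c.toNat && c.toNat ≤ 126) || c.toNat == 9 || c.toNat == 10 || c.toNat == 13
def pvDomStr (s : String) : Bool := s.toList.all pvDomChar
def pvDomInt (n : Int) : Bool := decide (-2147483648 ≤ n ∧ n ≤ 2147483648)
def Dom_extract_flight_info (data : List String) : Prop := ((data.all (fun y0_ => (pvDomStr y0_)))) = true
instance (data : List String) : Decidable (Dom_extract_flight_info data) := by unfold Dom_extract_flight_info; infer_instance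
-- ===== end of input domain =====

-- B replaces A's single stateful loop with boolean section flags by marker-based segmentation of the
-- line list plus a per-line field extractor; objective: alternative decomposition, same cost.
-- Equivalence of the RETURN value only.

-- ===== PORT A =====
-- single loop: section state (dep, arr, is_departure, is_arrival) and the dict updated together
def extract_flight_info (data : List String) : List (String × String) :=
  let flight_info : PySem.Dict String String := PySem.Dict.empty
  let flight_info := flight_info.insert "Description"
      (PySem.Str.strip (PySem.Str.replace (PySem.List.pyGetD data 0 "") "FLIGHT" ""))
  let flight_info := flight_info.insert "Equipment"
      (PySem.Str.strip (PySem.Str.replace (PySem.List.pyGetD data 2 "") "EQUIPMENT:" ""))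
  let lines := (PySem.Str.split? (PySem.Str.strip (PySem.List.pyGetD data 1 "")) "\n").getD []
  let st := lines.foldl
    (fun (st : (List String × List String × Bool × Bool) × PySem.Dict String String) line0 =>
      let line := PySem.Str.strip line0
      let sec :=
        if PySem.Str.startswith line "DEPARTURE:" then
          (st.1.1 ++ [PySem.Str.strip (PySem.Str.replace line "DEPARTURE:" "")], st.1.2.1, true, st.1.2.2.2)
        else if PySem.Str.startswith line "ARRIVAL:" then
          (st.1.1, st.1.2.1 ++ [PySem.Str.strip (PySem.Str.replace line "ARRIVAL:" "")], false, true)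
        else if st.1.2.2.1 then
          (st.1.1 ++ [line], st.1.2.1, st.1.2.2.1, st.1.2.2.2)
        else if st.1.2.2.2 then
          if PySem.Str.isIn "FLIGHT BOOKING REF" line then
            (st.1.1, st.1.2.1 ++ [PySem.Str.strip (PySem.List.pyGetD ((PySem.Str.split? line "FLIGHT BOOKING REF").getD []) 0 "")], st.1.2.2.1, false)
          else (st.1.1, st.1.2.1 ++ [line], st.1.2.2.1, st.1.2.2.2)
        else st.1
      let fi :=
        if PySem.Str.isIn "DURATION:" line then
          let parts := (PySem.Str.split? line "DURATION:").getD []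
          (st.2.insert "Economy Class"
              (PySem.Str.replace (PySem.Str.strip (PySem.List.pyGetD parts 0 "")) "RESERVATION CONFIRMED, " "")).insert
            "Duration" (PySem.Str.strip (PySem.List.pyGetD parts 1 ""))
        else if PySem.Str.isIn "BAGGAGE ALLOWANCE:" line then
          st.2.insert "Baggage" (PySem.Str.strip (PySem.Str.replace line "BAGGAGE ALLOWANCE:" ""))
        else if PySem.Str.isIn "MEAL:" line then
          st.2.insert "Meal" (PySem.Str.strip (PySem.Str.replace line "MEAL:" ""))
        else if PySem.Str.isIn "NON STOP" line then
          st.2.insert "NonStop" (PySem.Str.strip (PySem.Str.replace line "NON STOP" ""))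
        else st.2
      (sec, fi))
    (([], [], false, false), flight_info)
  let flight_info := st.2.insert "Departure" (PySem.Str.strip (PySem.Str.join "\n" st.1.1))
  let flight_info := flight_info.insert "Arrival" (PySem.Str.strip (PySem.Str.join "\n" st.1.2.1))
  flight_info.items

-- ===== PORT B =====
-- _is_marker: a line that opens a DEPARTURE/ARRIVAL segment
def efiMarker (l : String) : Bool :=
  PySem.Str.startswith l "DEPARTURE:" || PySem.Str.startswith l "ARRIVAL:"

-- _split_at_marker: longest marker-free prefix, and the rest from the first marker line on
def efiSplitAtMarker (ls : List String) : List String × List String :=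
  (ls.takeWhile (fun l => !efiMarker l), ls.dropWhile (fun l => !efiMarker l))

-- _arrival_body: body lines up to (and truncating) the first FLIGHT BOOKING REF line
def efiArrivalBody : List String → List String
  | [] => []
  | l :: ls =>
    if PySem.Str.isIn "FLIGHT BOOKING REF" l then
      [PySem.Str.strip (PySem.List.pyGetD ((PySem.Str.split? l "FLIGHT BOOKING REF").getD []) 0 "")]
    else l :: efiArrivalBody ls

-- _fields: the (key, value) updates a single line contributes
def efiFields (line : String) : List (String × String) :=
  if PySem.Str.isIn "DURATION:" line then
    let parts := (PySem.Str.split? line "DURATION:").getD []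
    [("Economy Class",
      PySem.Str.replace (PySem.Str.strip (PySem.List.pyGetD parts 0 "")) "RESERVATION CONFIRMED, " ""),
     ("Duration", PySem.Str.strip (PySem.List.pyGetD parts 1 ""))]
  else if PySem.Str.isIn "BAGGAGE ALLOWANCE:" line then
    [("Baggage", PySem.Str.strip (PySem.Str.replace line "BAGGAGE ALLOWANCE:" ""))]
  else if PySem.Str.isIn "MEAL:" line then
    [("Meal", PySem.Str.strip (PySem.Str.replace line "MEAL:" ""))]
  else if PySem.Str.isIn "NON STOP" line then
    [("NonStop", PySem.Str.strip (PySem.Str.replace line "NON STOP" ""))]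
  else []

-- the segment loop: rest always starts with a marker line (or is empty)
def efiSections (dep arr : List String) : List String → List String × List String
  | [] => (dep, arr)
  | head :: tail =>
    let p := efiSplitAtMarker tail
    if PySem.Str.startswith head "DEPARTURE:" then
      efiSections (dep ++ [PySem.Str.strip (PySem.Str.replace head "DEPARTURE:" "")] ++ p.1) arr p.2
    else
      efiSections dep (arr ++ [PySem.Str.strip (PySem.Str.replace head "ARRIVAL:" "")] ++ efiArrivalBody p.1) p.2
  termination_by ls => ls.length
  decreasing_by
    all_goals
      simp only [efiSplitAtMarker]
      have := List.length_dropWhile_le (fun l => !efiMarker l) tail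
      simp only [List.length_cons]; omega

def extract_flight_info_alt (data : List String) : List (String × String) :=
  let lines := ((PySem.Str.split? (PySem.Str.strip (PySem.List.pyGetD data 1 "")) "\n").getD []).map PySem.Str.strip
  let sec := efiSections [] [] (efiSplitAtMarker lines).2
  let fi : PySem.Dict String String :=
    (PySem.Dict.empty.insert "Description"
        (PySem.Str.strip (PySem.Str.replace (PySem.List.pyGetD data 0 "") "FLIGHT" ""))).insert
      "Equipment" (PySem.Str.strip (PySem.Str.replace (PySem.List.pyGetD data 2 "") "EQUIPMENT:" ""))
  let fi := lines.foldl (fun d line => (efiFields line).foldl (fun d kv => d.insert kv.1 kv.2) d) fi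
  let fi := fi.insert "Departure" (PySem.Str.strip (PySem.Str.join "\n" sec.1))
  let fi := fi.insert "Arrival" (PySem.Str.strip (PySem.Str.join "\n" sec.2))
  fi.items

-- ===== PRECONDITION & SPEC =====
-- Pre_ excludes only inputs with fewer than 3 elements, on which A raises IndexError (data[0]/data[1]/data[2]).
def Pre_extract_flight_info (data : List String) : Prop := 3 ≤ data.length
instance (data : List String) : Decidable (Pre_extract_flight_info data) := by
  unfold Pre_extract_flight_info; infer_instance

def pvWitness_extract_flight_info : List String :=
  ["FLIGHT VN123", "DEPARTURE: HAN\nARRIVAL: SGN\nMEAL: YES", "EQUIPMENT: A321"]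

def Spec_extract_flight_info (data : List String) (out : List (String × String)) : Prop :=
  out = extract_flight_info_alt data
instance (data : List String) (out : List (String × String)) :
    Decidable (Spec_extract_flight_info data out) := by
  unfold Spec_extract_flight_info; infer_instance

-- ===== CLAIM (what is proved, stated in full; the proofs are below) =====
def Claim_equal_extract_flight_info : Prop :=
  ∀ (data : List String), Dom_extract_flight_info data → Pre_extract_flight_info data →
    Spec_extract_flight_info data (extract_flight_info data)

-- ===== LEMMAS AND PROOFS =====

-- A's section-machine step on an already-stripped line (proof-side name for the first half of A's loop body)
def efiStepSec (sec : List String × List String × Bool × Bool) (line : String) :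
    List String × List String × Bool × Bool :=
  if PySem.Str.startswith line "DEPARTURE:" then
    (sec.1 ++ [PySem.Str.strip (PySem.Str.replace line "DEPARTURE:" "")], sec.2.1, true, sec.2.2.2)
  else if PySem.Str.startswith line "ARRIVAL:" then
    (sec.1, sec.2.1 ++ [PySem.Str.strip (PySem.Str.replace line "ARRIVAL:" "")], false, true)
  else if sec.2.2.1 then
    (sec.1 ++ [line], sec.2.1, sec.2.2.1, sec.2.2.2)
  else if sec.2.2.2 then
    if PySem.Str.isIn "FLIGHT BOOKING REF" line then
      (sec.1, sec.2.1 ++ [PySem.Str.strip (PySem.List.pyGetD ((PySem.Str.split? line "FLIGHT BOOKING REF").getD []) 0 "")], sec.2.2.1, false)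
    else (sec.1, sec.2.1 ++ [line], sec.2.2.1, sec.2.2.2)
  else sec

-- A's scalar-field step on an already-stripped line (second half of A's loop body)
def efiStepScal (fi : PySem.Dict String String) (line : String) : PySem.Dict String String :=
  if PySem.Str.isIn "DURATION:" line then
    let parts := (PySem.Str.split? line "DURATION:").getD []
    (fi.insert "Economy Class"
        (PySem.Str.replace (PySem.Str.strip (PySem.List.pyGetD parts 0 "")) "RESERVATION CONFIRMED, " "")).insert
      "Duration" (PySem.Str.strip (PySem.List.pyGetD parts 1 ""))
  else if PySem.Str.isIn "BAGGAGE ALLOWANCE:" line then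
    fi.insert "Baggage" (PySem.Str.strip (PySem.Str.replace line "BAGGAGE ALLOWANCE:" ""))
  else if PySem.Str.isIn "MEAL:" line then
    fi.insert "Meal" (PySem.Str.strip (PySem.Str.replace line "MEAL:" ""))
  else if PySem.Str.isIn "NON STOP" line then
    fi.insert "NonStop" (PySem.Str.strip (PySem.Str.replace line "NON STOP" ""))
  else fi

-- a fold whose body is a pair of independent updates on the stripped element splits into two folds over the stripped list
theorem foldl_split_strip {σ₁ σ₂ : Type}
    (F : σ₁ × σ₂ → String → σ₁ × σ₂) (f : σ₁ → String → σ₁) (g : σ₂ → String → σ₂)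
    (h : ∀ p x, F p x = (f p.1 (PySem.Str.strip x), g p.2 (PySem.Str.strip x))) :
    ∀ (l : List String) (a : σ₁) (b : σ₂),
      l.foldl F (a, b) = ((l.map PySem.Str.strip).foldl f a, (l.map PySem.Str.strip).foldl g b) := by
  intro l
  induction l with
  | nil => intro a b; rfl
  | cons x xs ih =>
    intro a b
    simp only [List.foldl_cons, List.map_cons, h (a, b) x]
    exact ih _ _

theorem efi_step (p : (List String × List String × Bool × Bool) × PySem.Dict String String)
    (x : String) :
    (fun (st : (List String × List String × Bool × Bool) × PySem.Dict String String) line0 =>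
      let line := PySem.Str.strip line0
      let sec :=
        if PySem.Str.startswith line "DEPARTURE:" then
          (st.1.1 ++ [PySem.Str.strip (PySem.Str.replace line "DEPARTURE:" "")], st.1.2.1, true, st.1.2.2.2)
        else if PySem.Str.startswith line "ARRIVAL:" then
          (st.1.1, st.1.2.1 ++ [PySem.Str.strip (PySem.Str.replace line "ARRIVAL:" "")], false, true)
        else if st.1.2.2.1 then
          (st.1.1 ++ [line], st.1.2.1, st.1.2.2.1, st.1.2.2.2)
        else if st.1.2.2.2 then
          if PySem.Str.isIn "FLIGHT BOOKING REF" line then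
            (st.1.1, st.1.2.1 ++ [PySem.Str.strip (PySem.List.pyGetD ((PySem.Str.split? line "FLIGHT BOOKING REF").getD []) 0 "")], st.1.2.2.1, false)
          else (st.1.1, st.1.2.1 ++ [line], st.1.2.2.1, st.1.2.2.2)
        else st.1
      let fi :=
        if PySem.Str.isIn "DURATION:" line then
          let parts := (PySem.Str.split? line "DURATION:").getD []
          (st.2.insert "Economy Class"
              (PySem.Str.replace (PySem.Str.strip (PySem.List.pyGetD parts 0 "")) "RESERVATION CONFIRMED, " "")).insert
            "Duration" (PySem.Str.strip (PySem.List.pyGetD parts 1 ""))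
        else if PySem.Str.isIn "BAGGAGE ALLOWANCE:" line then
          st.2.insert "Baggage" (PySem.Str.strip (PySem.Str.replace line "BAGGAGE ALLOWANCE:" ""))
        else if PySem.Str.isIn "MEAL:" line then
          st.2.insert "Meal" (PySem.Str.strip (PySem.Str.replace line "MEAL:" ""))
        else if PySem.Str.isIn "NON STOP" line then
          st.2.insert "NonStop" (PySem.Str.strip (PySem.Str.replace line "NON STOP" ""))
        else st.2
      (sec, fi)) p x
      = (efiStepSec p.1 (PySem.Str.strip x), efiStepScal p.2 (PySem.Str.strip x)) := by
  rfl

-- A's scalar step is exactly applying the updates B's field extractor returns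
theorem stepScal_eq_fields (fi : PySem.Dict String String) (line : String) :
    efiStepScal fi line =
      (efiFields line).foldl (fun d kv => d.insert kv.1 kv.2) fi := by
  unfold efiStepScal efiFields
  split_ifs <;> rfl

-- marker-free lines do nothing when both flags are off
theorem foldl_sec_idle (body : List String) (hb : ∀ l ∈ body, efiMarker l = false) :
    ∀ d a, body.foldl efiStepSec (d, a, false, false) = (d, a, false, false) := by
  induction body with
  | nil => intro d a; rfl
  | cons x xs ih =>
    intro d a
    have hx := hb x (by simp)
    simp only [efiMarker, Bool.or_eq_false_iff] at hx
    simp only [List.foldl_cons, efiStepSec, hx.1, hx.2, if_false, Bool.false_eq_true]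
    exact ih (fun l hl => hb l (by simp [hl])) d a

-- with is_departure set, marker-free lines are appended to the departure block
theorem foldl_sec_dep (body : List String) (hb : ∀ l ∈ body, efiMarker l = false) :
    ∀ d a isA, body.foldl efiStepSec (d, a, true, isA) = (d ++ body, a, true, isA) := by
  induction body with
  | nil => intro d a isA; simp
  | cons x xs ih =>
    intro d a isA
    have hx := hb x (by simp)
    simp only [efiMarker, Bool.or_eq_false_iff] at hx
    simp only [List.foldl_cons, efiStepSec, hx.1, hx.2, if_false, Bool.false_eq_true, if_true]
    rw [ih (fun l hl => hb l (by simp [hl])) (d ++ [x]) a isA]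
    simp

-- with is_arrival set, marker-free lines contribute exactly B's _arrival_body
theorem foldl_sec_arr (body : List String) (hb : ∀ l ∈ body, efiMarker l = false) :
    ∀ d a, ∃ f, body.foldl efiStepSec (d, a, false, true) = (d, a ++ efiArrivalBody body, false, f) := by
  induction body with
  | nil => intro d a; exact ⟨true, by simp [efiArrivalBody]⟩
  | cons x xs ih =>
    intro d a
    have hx := hb x (by simp)
    simp only [efiMarker, Bool.or_eq_false_iff] at hx
    by_cases hf : PySem.Str.isIn "FLIGHT BOOKING REF" x = true
    · refine ⟨false, ?_⟩
      simp only [List.foldl_cons, efiStepSec, hx.1, hx.2, hf, if_false, if_true,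
        Bool.false_eq_true, efiArrivalBody]
      rw [foldl_sec_idle xs (fun l hl => hb l (by simp [hl]))]
    · obtain ⟨f, hrec⟩ := ih (fun l hl => hb l (by simp [hl])) d (a ++ [x])
      refine ⟨f, ?_⟩
      simp only [List.foldl_cons, efiStepSec, hx.1, hx.2, hf, if_false, if_true,
        Bool.false_eq_true, efiArrivalBody]
      rw [hrec]
      simp

-- main correspondence: from any flags, on a list whose head (if any) is a marker line,
-- A's fold computes B's segmentation
theorem foldl_sec_sections :
    ∀ (n : Nat) (ls : List String), ls.length ≤ n →
      (∀ h ∈ ls.head?, efiMarker h = true) →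
      ∀ d a isD isA,
        ((ls.foldl efiStepSec (d, a, isD, isA)).1,
         (ls.foldl efiStepSec (d, a, isD, isA)).2.1) = efiSections d a ls := by
  intro n
  induction n with
  | zero =>
    intro ls hlen _ d a isD isA
    have : ls = [] := List.length_eq_zero_iff.mp (Nat.le_zero.mp hlen)
    subst this; rw [efiSections]; rfl
  | succ n ih =>
    intro ls hlen hhead d a isD isA
    cases ls with
    | nil => rw [efiSections]; rfl
    | cons h t =>
      have hm : efiMarker h = true := hhead h (by simp)
      have ht : t.takeWhile (fun l => !efiMarker l) ++ t.dropWhile (fun l => !efiMarker l) = t :=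
        List.takeWhile_append_dropWhile
      have hbody : ∀ l ∈ t.takeWhile (fun l => !efiMarker l), efiMarker l = false := by
        intro l hl
        have := List.mem_takeWhile_imp hl
        simpa using this
      have hresthead : ∀ x ∈ (t.dropWhile (fun l => !efiMarker l)).head?, efiMarker x = true := by
        intro x hx
        cases hr : t.dropWhile (fun l => !efiMarker l) with
        | nil => rw [hr] at hx; simp at hx
        | cons y ys =>
          have hne : t.dropWhile (fun l => !efiMarker l) ≠ [] := by simp [hr]
          have h0 := List.head_dropWhile_not (fun l => !efiMarker l) hne
          rw [hr] at hx
          simp only [List.head?_cons, Option.mem_some_iff] at hx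
          subst hx
          simp only [hr, List.head_cons, Bool.not_eq_eq_eq_not, Bool.not_false] at h0
          exact h0
      have hrestlen : (t.dropWhile (fun l => !efiMarker l)).length ≤ n := by
        have h1 := List.length_dropWhile_le (fun l => !efiMarker l) t
        simp only [List.length_cons] at hlen
        omega
      by_cases hd : PySem.Str.startswith h "DEPARTURE:" = true
      · have hstep : efiStepSec (d, a, isD, isA) h =
            (d ++ [PySem.Str.strip (PySem.Str.replace h "DEPARTURE:" "")], a, true, isA) := by
          unfold efiStepSec; rw [if_pos hd]
        rw [List.foldl_cons, hstep, ← ht, List.foldl_append,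
          foldl_sec_dep _ hbody, ih _ hrestlen hresthead, efiSections]
        simp only [efiSplitAtMarker]
        rw [if_pos hd]
        simp [List.append_assoc]
      · have ha : PySem.Str.startswith h "ARRIVAL:" = true := by
          simp only [efiMarker, Bool.or_eq_true] at hm
          tauto
        have hstep : efiStepSec (d, a, isD, isA) h =
            (d, a ++ [PySem.Str.strip (PySem.Str.replace h "ARRIVAL:" "")], false, true) := by
          unfold efiStepSec; rw [if_neg hd, if_pos ha]
        obtain ⟨f, harr⟩ := foldl_sec_arr _ hbody d
          (a ++ [PySem.Str.strip (PySem.Str.replace h "ARRIVAL:" "")])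
        rw [List.foldl_cons, hstep, ← ht, List.foldl_append, harr,
          ih _ hrestlen hresthead, efiSections]
        simp only [efiSplitAtMarker]
        rw [if_neg hd]
        simp [List.append_assoc]

-- ===== VERDICT (by name: the statement is the Claim_ definition above) =====
theorem extract_flight_info_spec : Claim_equal_extract_flight_info := by
  intro data _ _
  unfold Spec_extract_flight_info extract_flight_info extract_flight_info_alt
  simp only [foldl_split_strip _ efiStepSec efiStepScal efi_step]
  generalize ((PySem.Str.split? (PySem.Str.strip (PySem.List.pyGetD data 1 "")) "\n").getD []).map PySem.Str.strip = L
  -- sections: drop the marker-free preamble, then the segment correspondence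
  have htake : ∀ l ∈ L.takeWhile (fun l => !efiMarker l), efiMarker l = false := by
    intro l hl
    have := List.mem_takeWhile_imp hl
    simpa using this
  have hresthead : ∀ x ∈ (L.dropWhile (fun l => !efiMarker l)).head?, efiMarker x = true := by
    intro x hx
    cases hr : L.dropWhile (fun l => !efiMarker l) with
    | nil => rw [hr] at hx; simp at hx
    | cons y ys =>
      have hne : L.dropWhile (fun l => !efiMarker l) ≠ [] := by simp [hr]
      have h0 := List.head_dropWhile_not (fun l => !efiMarker l) hne
      rw [hr] at hx
      simp only [List.head?_cons, Option.mem_some_iff] at hx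
      subst hx
      simp only [hr, List.head_cons, Bool.not_eq_eq_eq_not, Bool.not_false] at h0
      exact h0
  have hsec : ((L.foldl efiStepSec ([], [], false, false)).1,
      (L.foldl efiStepSec ([], [], false, false)).2.1) = efiSections [] [] (efiSplitAtMarker L).2 := by
    conv_lhs => rw [← List.takeWhile_append_dropWhile (p := fun l => !efiMarker l) (l := L)]
    rw [List.foldl_append, foldl_sec_idle _ htake]
    exact foldl_sec_sections _ _ (Nat.le_refl _) hresthead [] [] false false
  have h1 := congrArg Prod.fst hsec
  have h2 := congrArg (fun p => p.2) hsec
  simp only at h1 h2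
  rw [h1, h2]
  rw [List.foldl_ext _ _ _ (fun a x _ => stepScal_eq_fields a x)]
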